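-- pv_equiv track=rewrite | github.com/BuitKing/buitking-loadouts | wz_scrape_meta.py | parse_attachment_text
-- ===== SOURCE A (Python) =====
-- ATTACHMENT_SLOTS = {
--     "muzzle", "barrel", "underbarrel", "laser", "ammunition", "magazine",
--     "optic", "stock", "rear grip", "fire mods", "fire mod", "trigger",
--     "trigger action", "combo", "comb"
-- }
--
-- def normalize_slot(s):
--     s = s.strip()
--     low = s.lower()
--     if low in ("fire mods", "fire mod"):   return "Fire Mods"
--     if low == "rear grip":                 return "Rear Grip"
--     if low == "trigger action":            return "Trigger Action"
--     return s.title()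
--
-- def parse_attachment_text(text):
--     """
--     Attachment text looks like: 'MuzzleMonolithic Suppressor'
--     Slot name is concatenated with the value — we split on known slot names.
--     """
--     slots_sorted = sorted(ATTACHMENT_SLOTS, key=len, reverse=True)
--     tl = text.strip()
--     for slot in slots_sorted:
--         if tl.lower().startswith(slot):
--             value = tl[len(slot):].strip()
--             return normalize_slot(slot), value
--     return None, tl
-- ===== SOURCE B (Python) =====
-- ATTACHMENT_SLOTS = {
--     "muzzle", "barrel", "underbarrel", "laser", "ammunition", "magazine",
--     "optic", "stock", "rear grip", "fire mods", "fire mod", "trigger",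
--     "trigger action", "combo", "comb"
-- }
--
-- def normalize_slot(s):
--     s = s.strip()
--     low = s.lower()
--     if low in ("fire mods", "fire mod"):   return "Fire Mods"
--     if low == "rear grip":                 return "Rear Grip"
--     if low == "trigger action":            return "Trigger Action"
--     return s.title()
--
-- def parse_attachment_text(text):
--     """Single pass, no sorting: keep the longest slot name prefixing the text."""
--     tl = text.strip()
--     tl_low = tl.lower()
--     best = None
--     for slot in ATTACHMENT_SLOTS:
--         if tl_low.startswith(slot) and (best is None or len(slot) > len(best)):
--             best = slot
--     if best is None:
--         return None, tl
--     return normalize_slot(best), tl[len(best):].strip()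
-- ===== Notes on version B (the rewrite author's own statement) =====
-- stated objective: simpler
-- what changed: B drops the sort-by-length-descending pass and the early-return scan, doing one pass over the slot set that keeps the longest matching prefix in a running `best`.
import Mathlib
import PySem

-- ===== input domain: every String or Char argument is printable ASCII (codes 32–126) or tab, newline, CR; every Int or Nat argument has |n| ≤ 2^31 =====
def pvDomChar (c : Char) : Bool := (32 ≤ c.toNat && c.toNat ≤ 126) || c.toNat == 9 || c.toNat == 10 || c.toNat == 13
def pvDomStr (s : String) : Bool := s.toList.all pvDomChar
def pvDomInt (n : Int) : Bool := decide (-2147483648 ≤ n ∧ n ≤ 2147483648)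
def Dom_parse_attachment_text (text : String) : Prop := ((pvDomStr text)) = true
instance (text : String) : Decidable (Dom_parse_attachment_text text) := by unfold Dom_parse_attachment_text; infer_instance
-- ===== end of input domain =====

-- B replaces A's sort-by-length-then-first-match scan with a single pass keeping the
-- longest matching slot prefix; objective: simpler (no sorting step).

-- ===== PORT A =====
def ATTACHMENT_SLOTS : PySem.Set String :=
  PySem.Set.ofList ["muzzle", "barrel", "underbarrel", "laser", "ammunition", "magazine",
    "optic", "stock", "rear grip", "fire mods", "fire mod", "trigger",
    "trigger action", "combo", "comb"]

-- hand port of Python str.title(); exact on the ASCII domain (a char is "cased" iff alphabetic there)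
def pvTitleChars : List Char → Bool → List Char
  | [], _ => []
  | c :: rest, prevAlpha =>
    (if PySem.Chars.isalpha c then
        (if prevAlpha then PySem.Chars.lowerChar c else PySem.Chars.upperChar c)
      else c) :: pvTitleChars rest (PySem.Chars.isalpha c)

def normalize_slot (s : String) : String :=
  let s := PySem.Str.strip s
  let low := PySem.Str.lower s
  if low = "fire mods" ∨ low = "fire mod" then "Fire Mods"
  else if low = "rear grip" then "Rear Grip"
  else if low = "trigger action" then "Trigger Action"
  else String.ofList (pvTitleChars s.toList false)

-- the 'for slot in slots_sorted: …return…' loop of A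
def pvFindSlot (tl : String) : List String → Option String × String
  | [] => (none, tl)
  | slot :: rest =>
    if PySem.Str.startswith (PySem.Str.lower tl) slot then
      (some (normalize_slot slot), PySem.Str.strip (PySem.Str.slice tl (some (PySem.Str.len slot)) none))
    else pvFindSlot tl rest

def parse_attachment_text (text : String) : Option String × String :=
  let slots_sorted := PySem.List.sorted ATTACHMENT_SLOTS (fun s => PySem.Str.len s) true
  let tl := PySem.Str.strip text
  pvFindSlot tl slots_sorted

-- ===== PORT B =====
-- the 'for slot in ATTACHMENT_SLOTS: …best…' loop of B
def pvBestSlot (tlLow : String) : List String → Option String → Option String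
  | [], best => best
  | slot :: rest, best =>
    pvBestSlot tlLow rest
      (if PySem.Str.startswith tlLow slot &&
          (match best with
           | none => true
           | some b => decide (PySem.Str.len b < PySem.Str.len slot)) then
        some slot
      else best)

def parse_attachment_text_alt (text : String) : Option String × String :=
  let tl := PySem.Str.strip text
  let tlLow := PySem.Str.lower tl
  match pvBestSlot tlLow ATTACHMENT_SLOTS none with
  | none => (none, tl)
  | some best =>
      (some (normalize_slot best), PySem.Str.strip (PySem.Str.slice tl (some (PySem.Str.len best)) none))

-- ===== PRECONDITION & SPEC =====
def Spec_parse_attachment_text (text : String) (out : Option String × String) : Prop := out = parse_attachment_text_alt text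
instance (text : String) (out : Option String × String) : Decidable (Spec_parse_attachment_text text out) := by unfold Spec_parse_attachment_text; infer_instance

-- ===== CLAIM (what is proved, stated in full; the proofs are below) =====
def Claim_equal_parse_attachment_text : Prop := ∀ (text : String), Dom_parse_attachment_text text → Spec_parse_attachment_text text (parse_attachment_text text)

-- ===== LEMMAS AND PROOFS =====

-- the common result shape: what both ports return once the chosen slot (or none) is known
def pvOut (tl : String) : Option String → Option String × String
  | none => (none, tl)
  | some b => (some (normalize_slot b), PySem.Str.strip (PySem.Str.slice tl (some (PySem.Str.len b)) none))

-- "o is the longest p-matching element of xs (or none matches)"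
def pvIsBest (p : String → Bool) (o : Option String) (xs : List String) : Prop :=
  match o with
  | none => ∀ s ∈ xs, p s = false
  | some b => b ∈ xs ∧ p b = true ∧ ∀ s ∈ xs, p s = true → PySem.Str.len s ≤ PySem.Str.len b

theorem pvFindSlot_spec (tl : String) (xs : List String)
    (h : xs.Pairwise (fun a b => PySem.Str.len b ≤ PySem.Str.len a)) :
    ∃ o, pvIsBest (fun s => PySem.Str.startswith (PySem.Str.lower tl) s) o xs ∧
      pvFindSlot tl xs = pvOut tl o := by
  induction xs with
  | nil => exact ⟨none, by simp [pvIsBest], rfl⟩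
  | cons slot rest ih =>
    rcases List.pairwise_cons.mp h with ⟨hhd, htl⟩
    by_cases hp : PySem.Str.startswith (PySem.Str.lower tl) slot = true
    · refine ⟨some slot, ⟨List.mem_cons_self, hp, ?_⟩, by
        simp only [pvFindSlot]; rw [if_pos hp]; rfl⟩
      intro s hs _
      rcases List.mem_cons.mp hs with rfl | hs
      · exact le_refl _
      · exact hhd s hs
    · rcases ih htl with ⟨o, hb, heq⟩
      refine ⟨o, ?_, by simp only [pvFindSlot]; rw [if_neg hp]; exact heq⟩
      cases o with
      | none =>
        intro s hs
        rcases List.mem_cons.mp hs with rfl | hs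
        · exact eq_false_of_ne_true hp
        · exact hb s hs
      | some b =>
        rcases hb with ⟨hmem, hpb, hmax⟩
        refine ⟨List.mem_cons_of_mem _ hmem, hpb, ?_⟩
        intro s hs hps
        rcases List.mem_cons.mp hs with rfl | hs
        · exact absurd hps hp
        · exact hmax s hs hps

theorem pvBestSlot_spec (tlLow : String) (xs : List String) :
    ∀ (seen : List String) (best : Option String),
      pvIsBest (fun s => PySem.Str.startswith tlLow s) best seen →
      pvIsBest (fun s => PySem.Str.startswith tlLow s) (pvBestSlot tlLow xs best) (seen ++ xs) := by
  induction xs with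
  | nil => intro seen best hb; simpa [pvBestSlot] using hb
  | cons slot rest ih =>
    intro seen best hb
    simp only [pvBestSlot]
    have happ : seen ++ slot :: rest = (seen ++ [slot]) ++ rest := by simp
    rw [happ]
    apply ih
    cases best with
    | none =>
      simp only [Bool.and_true]
      by_cases hp : PySem.Str.startswith tlLow slot = true
      · rw [if_pos hp]
        refine ⟨by simp, hp, ?_⟩
        intro s hs hps
        rcases List.mem_append.mp hs with hs | hs
        · rw [hb s hs] at hps; simp at hps
        · simp only [List.mem_singleton] at hs; subst hs; exact le_refl _
      · rw [if_neg hp]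
        intro s hs
        rcases List.mem_append.mp hs with hs | hs
        · exact hb s hs
        · simp only [List.mem_singleton] at hs; subst hs
          exact eq_false_of_ne_true hp
    | some b =>
      rcases hb with ⟨hmem, hpb, hmax⟩
      split_ifs with hc
      · simp only [Bool.and_eq_true, decide_eq_true_eq] at hc
        refine ⟨by simp, hc.1, ?_⟩
        intro s hs hps
        rcases List.mem_append.mp hs with hs | hs
        · exact le_of_lt (lt_of_le_of_lt (hmax s hs hps) hc.2)
        · simp only [List.mem_singleton] at hs; subst hs; exact le_refl _
      · simp only [Bool.and_eq_true, decide_eq_true_eq, not_and, not_lt] at hc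
        refine ⟨List.mem_append_left _ hmem, hpb, ?_⟩
        intro s hs hps
        rcases List.mem_append.mp hs with hs | hs
        · exact hmax s hs hps
        · simp only [List.mem_singleton] at hs; subst hs; exact hc hps

-- two prefixes of the same string with equal length are equal
theorem pv_startswith_len_eq (t s1 s2 : String)
    (h1 : PySem.Str.startswith t s1 = true) (h2 : PySem.Str.startswith t s2 = true)
    (hlen : PySem.Str.len s1 = PySem.Str.len s2) : s1 = s2 := by
  rw [PySem.Str.startswith_eq, PySem.Chars.startswith_iff] at h1 h2
  simp only [PySem.Str.len_eq] at hlen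
  have hlen' : s1.toList.length = s2.toList.length := by exact_mod_cast hlen
  have hpre : s1.toList <+: s2.toList :=
    List.prefix_of_prefix_length_le h1 h2 (le_of_eq hlen')
  have : s1.toList = s2.toList := List.IsPrefix.eq_of_length hpre hlen'
  exact String.toList_inj.mp this

theorem pvIsBest_unique (t : String) (o1 o2 : Option String) (xs ys : List String)
    (hmem : ∀ s, s ∈ xs ↔ s ∈ ys)
    (h1 : pvIsBest (fun s => PySem.Str.startswith t s) o1 xs)
    (h2 : pvIsBest (fun s => PySem.Str.startswith t s) o2 ys) : o1 = o2 := by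
  cases o1 with
  | none =>
    cases o2 with
    | none => rfl
    | some b2 =>
      rcases h2 with ⟨hmem2, hp2, _⟩
      rw [h1 b2 ((hmem b2).mpr hmem2)] at hp2
      simp at hp2
  | some b1 =>
    cases o2 with
    | none =>
      rcases h1 with ⟨hmem1, hp1, _⟩
      rw [h2 b1 ((hmem b1).mp hmem1)] at hp1
      simp at hp1
    | some b2 =>
      rcases h1 with ⟨hmem1, hp1, hmax1⟩
      rcases h2 with ⟨hmem2, hp2, hmax2⟩
      have hle1 : PySem.Str.len b2 ≤ PySem.Str.len b1 := hmax1 b2 ((hmem b2).mpr hmem2) hp2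
      have hle2 : PySem.Str.len b1 ≤ PySem.Str.len b2 := hmax2 b1 ((hmem b1).mp hmem1) hp1
      exact congrArg some (pv_startswith_len_eq t b1 b2 hp1 hp2 (le_antisymm hle2 hle1))

theorem pv_generic (tl : String) (L : List String) :
    pvFindSlot tl (PySem.List.sorted L (fun s => PySem.Str.len s) true) =
      pvOut tl (pvBestSlot (PySem.Str.lower tl) L none) := by
  obtain ⟨o, hbA, heqA⟩ := pvFindSlot_spec tl
    (PySem.List.sorted L (fun s => PySem.Str.len s) true)
    (PySem.List.sorted_pairwise_rev L (fun s => PySem.Str.len s))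
  have hbB := pvBestSlot_spec (PySem.Str.lower tl) L [] none (by intro s hs; simp at hs)
  rw [List.nil_append] at hbB
  have hoeq : o = pvBestSlot (PySem.Str.lower tl) L none :=
    pvIsBest_unique (PySem.Str.lower tl) _ _ _ _
      (fun s => PySem.List.mem_sorted L (fun s => PySem.Str.len s) true s) hbA hbB
  rw [heqA, hoeq]

-- ===== VERDICT (by name: the statement is the Claim_ definition above) =====
theorem parse_attachment_text_spec : Claim_equal_parse_attachment_text := by
  intro text _
  show parse_attachment_text text = parse_attachment_text_alt text
  have h := pv_generic (PySem.Str.strip text) ATTACHMENT_SLOTS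
  refine Eq.trans ?_ (Eq.trans h ?_)
  · rfl
  · cases hh : pvBestSlot (PySem.Str.lower (PySem.Str.strip text)) ATTACHMENT_SLOTS none <;>
      simp [pvOut, parse_attachment_text_alt, hh]
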